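-- pv_equiv track=rewrite | github.com/aman-ash/DSA_Questions | Uber.py | func
-- ===== SOURCE A (Python) =====
-- def func(s):
--     num = ''
--     for w in s:
--         if w:
--             num += '0'
--         else:
--             num += '1'
--
--     num = int(num, 2)
--     ans = int(str_base(num, 6))
--     res = []
--     while ans > 0:
--         res.append(ans % 10)
--         ans //= 10
--     return res
--
-- def str_base(val, base):
--     res = ''
--     while val > 0:
--         res = str(val % base) + res
--         val //= base
--     if res: return res
--     return '0'
-- ===== SOURCE B (Python) =====
-- def func(s):
--     binary = ''.join('0' if w else '1' for w in s)
--     num = int(binary, 2)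
--     res = []
--     while num > 0:
--         res.append(num % 6)
--         num //= 6
--     return res
-- ===== Notes on version B (the rewrite author's own statement) =====
-- stated objective: simpler
-- what changed: B drops the str_base base-6-string helper, the int() decimal re-parse and the decimal-digit loop, and extracts the base-6 digits of the binary value directly with one num%6 / num//=6 loop (valid because every base-6 digit is < 10, so A's decimal round-trip just reverses them).
import Mathlib
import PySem

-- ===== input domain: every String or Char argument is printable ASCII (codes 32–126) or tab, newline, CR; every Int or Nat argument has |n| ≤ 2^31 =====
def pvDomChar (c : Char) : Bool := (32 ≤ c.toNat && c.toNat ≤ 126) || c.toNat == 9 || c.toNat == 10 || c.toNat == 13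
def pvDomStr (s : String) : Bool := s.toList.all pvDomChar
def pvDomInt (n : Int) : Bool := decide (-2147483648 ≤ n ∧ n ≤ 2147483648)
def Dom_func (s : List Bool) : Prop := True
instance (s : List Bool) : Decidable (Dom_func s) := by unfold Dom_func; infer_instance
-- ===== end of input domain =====

-- B drops A's base-6-string/decimal round-trip (str_base + int + decimal-digit loop) and
-- extracts the base-6 digits directly with one %6 // 6 loop (simpler; same results).


-- ===== PORT A =====
-- str_base's loop 'res = str(val % base) + res; val //= base' as structural recursion
-- (each prepended digit char is exact: 0 ≤ val % 6 < 6, so str(val % 6) is one char '0'..'5')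
def strBaseLoop (val : Int) : List Char :=
  if _h : 0 < val then
    strBaseLoop (PySem.Int.floordiv val 6) ++ [Char.ofNat (48 + (PySem.Int.mod val 6).toNat)]
  else []
  termination_by val.toNat
  decreasing_by
    rw [PySem.Int.floordiv_eq_ediv_of_pos (by norm_num : (0:Int) < 6)]; omega

-- str_base(val, 6): 'if res: return res / return "0"'
def strBase6 (val : Int) : List Char :=
  let res := strBaseLoop val
  if res = [] then ['0'] else res

-- the 'while ans > 0: res.append(ans % 10); ans //= 10' loop
def decDigitLoop (ans : Int) : List Int :=
  if _h : 0 < ans then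
    PySem.Int.mod ans 10 :: decDigitLoop (PySem.Int.floordiv ans 10)
  else []
  termination_by ans.toNat
  decreasing_by
    rw [PySem.Int.floordiv_eq_ediv_of_pos (by norm_num : (0:Int) < 10)]; omega

def func (s : List Bool) : List Int :=
  -- num += '0' if w else '1'
  let numStr : List Char := s.foldl (fun cs w => cs ++ [if w then '0' else '1']) []
  -- int(num, 2): hand-ported binary parse; exact here because under Pre_ numStr is a
  -- nonempty string of '0'/'1' chars only (no sign/whitespace/underscore ever occurs)
  let num : Int := numStr.foldl (fun a c => a * 2 + (if c = '1' then 1 else 0)) 0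
  -- int(str_base(num, 6)): hand-ported decimal parse; exact because str_base returns a
  -- nonempty plain decimal-digit string
  let ans : Int := (strBase6 num).foldl (fun a c => a * 10 + ((c.toNat : Int) - 48)) 0
  decDigitLoop ans

-- ===== PORT B =====
-- the 'while num > 0: res.append(num % 6); num //= 6' loop
def base6Loop (num : Int) : List Int :=
  if _h : 0 < num then
    PySem.Int.mod num 6 :: base6Loop (PySem.Int.floordiv num 6)
  else []
  termination_by num.toNat
  decreasing_by
    rw [PySem.Int.floordiv_eq_ediv_of_pos (by norm_num : (0:Int) < 6)]; omega

def func_alt (s : List Bool) : List Int :=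
  let binary : List Char := s.map (fun w => if w then '0' else '1')
  -- int(binary, 2): same hand-ported binary parse, exact for the same reason
  let num : Int := binary.foldl (fun a c => a * 2 + (if c = '1' then 1 else 0)) 0
  base6Loop num

-- ===== PRECONDITION & SPEC =====
-- Pre_ excludes only the empty list, on which A's int('', 2) raises ValueError (B raises too)
def Pre_func (s : List Bool) : Prop := s ≠ []
instance (s : List Bool) : Decidable (Pre_func s) := by unfold Pre_func; infer_instance
def pvWitness_func : List Bool := [false, true]

def Spec_func (s : List Bool) (out : List Int) : Prop := out = func_alt s
instance (s : List Bool) (out : List Int) : Decidable (Spec_func s out) := by unfold Spec_func; infer_instance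

-- ===== CLAIM (what is proved, stated in full; the proofs are below) =====
def Claim_equal_func : Prop := ∀ (s : List Bool), Dom_func s → Pre_func s → Spec_func s (func s)

-- ===== LEMMAS AND PROOFS =====

-- proof-side mirror of 'int(str_base(n, 6))': the number whose decimal digits are n's base-6 digits
def reDec (n : Int) : Int :=
  if _h : 0 < n then reDec (PySem.Int.floordiv n 6) * 10 + PySem.Int.mod n 6
  else 0
  termination_by n.toNat
  decreasing_by
    rw [PySem.Int.floordiv_eq_ediv_of_pos (by norm_num : (0:Int) < 6)]; omega

theorem reDec_nonneg (n : Int) : 0 ≤ reDec n := by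
  fun_induction reDec n with
  | case1 n h ih =>
    have := PySem.Int.mod_nonneg n (by norm_num : (0:Int) < 6)
    omega
  | case2 n h => simp

theorem reDec_pos (n : Int) (hn : 0 < n) : 0 < reDec n := by
  fun_induction reDec n with
  | case1 n h ih =>
    have h2 := PySem.Int.mod_nonneg n (by norm_num : (0:Int) < 6)
    by_cases hq : 0 < PySem.Int.floordiv n 6
    · have h3 := ih hq
      omega
    · -- n // 6 ≤ 0 and n > 0 force n % 6 = n > 0
      have h4 := PySem.Int.floordiv_mul_add_mod n 6
      have h5 : reDec (PySem.Int.floordiv n 6) = 0 := by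
        rw [reDec, dif_neg hq]
      omega
  | case2 n h => exact absurd hn h

theorem decDigitLoop_reDec (n : Int) (hn : 0 ≤ n) : decDigitLoop (reDec n) = base6Loop n := by
  fun_induction base6Loop n with
  | case1 n h ih =>
    have hr : reDec n = reDec (PySem.Int.floordiv n 6) * 10 + PySem.Int.mod n 6 := by
      rw [reDec, dif_pos h]
    have hq0 : 0 ≤ PySem.Int.floordiv n 6 := by
      rw [PySem.Int.floordiv_eq_ediv_of_pos (by norm_num : (0:Int) < 6)]; omega
    have hQ := reDec_nonneg (PySem.Int.floordiv n 6)
    have hm0 := PySem.Int.mod_nonneg n (by norm_num : (0:Int) < 6)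
    have hm6 := PySem.Int.mod_lt n (by norm_num : (0:Int) < 6)
    have hpos : 0 < reDec n := reDec_pos n h
    rw [decDigitLoop]
    simp only [hpos, dif_pos]
    have hmod : PySem.Int.mod (reDec n) 10 = PySem.Int.mod n 6 := by
      rw [PySem.Int.mod_eq_emod_of_pos (by norm_num : (0:Int) < 10), hr]; omega
    have hdiv : PySem.Int.floordiv (reDec n) 10 = reDec (PySem.Int.floordiv n 6) := by
      rw [PySem.Int.floordiv_eq_ediv_of_pos (by norm_num : (0:Int) < 10), hr]; omega
    rw [hmod, hdiv, ih hq0]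
  | case2 n h =>
    have hn0 : n = 0 := by omega
    subst hn0
    have h0 : reDec 0 = 0 := by rw [reDec, dif_neg (by norm_num)]
    rw [h0, decDigitLoop, dif_neg (by norm_num)]

-- int(...) of str_base's digit string equals reDec
theorem decParse_strBaseLoop (n : Int) :
    (strBaseLoop n).foldl (fun a c => a * 10 + ((c.toNat : Int) - 48)) 0 = reDec n := by
  fun_induction strBaseLoop n with
  | case1 n h ih =>
    rw [List.foldl_append]
    have hm0 := PySem.Int.mod_nonneg n (by norm_num : (0:Int) < 6)
    have hm6 := PySem.Int.mod_lt n (by norm_num : (0:Int) < 6)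
    have hc : ((Char.ofNat (48 + (PySem.Int.mod n 6).toNat)).toNat : Int)
        = 48 + PySem.Int.mod n 6 := by
      set k := (PySem.Int.mod n 6).toNat with hk
      have hk6 : k < 6 := by omega
      have : (Char.ofNat (48 + k)).toNat = 48 + k := by
        interval_cases k <;> decide
      rw [this]; omega
    rw [reDec, dif_pos h]
    simp only [List.foldl_cons, List.foldl_nil, ih, hc]
    omega
  | case2 n h => rw [reDec, dif_neg h]; simp

theorem decParse_strBase6 (n : Int) :
    (strBase6 n).foldl (fun a c => a * 10 + ((c.toNat : Int) - 48)) 0 = reDec n := by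
  simp only [strBase6]
  by_cases hres : strBaseLoop n = []
  · rw [if_pos hres]
    have h0 : ¬ 0 < n := by
      intro h0
      rw [strBaseLoop, dif_pos h0] at hres
      simp at hres
    rw [reDec, dif_neg h0]
    norm_num [List.foldl]
    decide
  · rw [if_neg hres]
    exact decParse_strBaseLoop n

theorem binParse_nonneg (l : List Char) (a : Int) (ha : 0 ≤ a) :
    0 ≤ l.foldl (fun a c => a * 2 + (if c = '1' then 1 else 0)) a := by
  induction l generalizing a with
  | nil => simpa
  | cons c l ih =>
    exact ih _ (by dsimp only; split_ifs <;> omega)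

-- ===== VERDICT (by name: the statement is the Claim_ definition above) =====
theorem func_spec : Claim_equal_func := by
  intro s _ _
  unfold Spec_func
  simp only [func, func_alt]
  rw [PySem.List.foldl_append_singleton_eq_map, List.nil_append]
  set num := (s.map (fun w => if w = true then '0' else '1')).foldl
      (fun a c => a * 2 + (if c = '1' then 1 else 0)) (0 : Int) with hnum
  have hn : 0 ≤ num := binParse_nonneg _ 0 le_rfl
  rw [decParse_strBase6 num, decDigitLoop_reDec num hn]
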